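-- pv_equiv track=rewrite | github.com/tosoba/Grind | advent_of_code_2020/d11_seats.py | can_see_occupied_west
-- ===== SOURCE A (Python) =====
-- from typing import List, Callable, Tuple
--
-- def can_see_occupied_west(grid: List[List[str]], i: int, j: int) -> bool:
--     index = j - 1
--     can_see = False
--     while index >= 0:
--         if grid[i][index] == '#':
--             can_see = True
--             break
--         elif grid[i][index] == 'L':
--             can_see = False
--             break
--         index -= 1
--     return can_see
-- ===== SOURCE B (Python) =====
-- def can_see_occupied_west(grid, i, j):
--     if j <= 0:
--         return False
--     seats = [c for c in grid[i][:j] if c in ('#', 'L')]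
--     return bool(seats) and seats[-1] == '#'
-- ===== Notes on version B (the rewrite author's own statement) =====
-- stated objective: idiomatic
-- what changed: B replaces A's westward index-decrement loop with explicit break branches by a forward filter of the western prefix keeping only seat cells ('#'/'L') and a single look at the last kept seat.
import Mathlib
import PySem

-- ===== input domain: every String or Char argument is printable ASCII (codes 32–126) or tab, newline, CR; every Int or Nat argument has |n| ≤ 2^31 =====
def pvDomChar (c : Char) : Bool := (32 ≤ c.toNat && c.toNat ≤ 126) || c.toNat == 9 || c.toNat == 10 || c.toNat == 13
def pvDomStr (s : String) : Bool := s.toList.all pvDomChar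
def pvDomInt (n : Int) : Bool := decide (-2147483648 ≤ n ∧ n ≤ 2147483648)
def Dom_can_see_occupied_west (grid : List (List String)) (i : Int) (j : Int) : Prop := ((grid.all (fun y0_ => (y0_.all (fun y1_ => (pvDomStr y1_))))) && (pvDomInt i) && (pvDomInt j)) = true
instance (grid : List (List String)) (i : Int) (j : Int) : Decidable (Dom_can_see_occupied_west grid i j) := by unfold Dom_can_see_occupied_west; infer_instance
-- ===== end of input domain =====

-- B replaces A's westward index-decrement loop (with '#'/'L' break branches) by a forward
-- filter of the western prefix keeping only seat cells, then one look at the last kept seat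
-- (objective: idiomatic; same cost).


-- ===== PORT A =====
-- the while loop of A: index counts down; 'can_see' is the loop variable returned at the end.
-- On an out-of-range access (Python IndexError, excluded by Pre_) the port returns can_see.
def canSeeWestLoop (grid : List (List String)) (i : Int) (index : Int) (can_see : Bool) : Bool :=
  if _h : 0 ≤ index then
    match (PySem.List.pyGet? grid i).bind (fun row => PySem.List.pyGet? row index) with
    | some c =>
        if c = "#" then true
        else if c = "L" then false
        else canSeeWestLoop grid i (index - 1) can_see
    | none => can_see   -- IndexError in Python; unreachable under Pre_
  else can_see
termination_by (index + 1).toNat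
decreasing_by omega

def can_see_occupied_west (grid : List (List String)) (i : Int) (j : Int) : Bool :=
  canSeeWestLoop grid i (j - 1) false

-- ===== PORT B =====
def can_see_occupied_west_alt (grid : List (List String)) (i : Int) (j : Int) : Bool :=
  if j ≤ 0 then false
  else
    let row := (PySem.List.pyGet? grid i).getD []      -- grid[i]; Pre_ guarantees it exists
    let seats := (PySem.List.slice row none (some j)).filter (fun c => c = "#" ∨ c = "L")
    match seats.getLast? with                           -- bool(seats) and seats[-1] == '#'
    | none => false
    | some c => c = "#"

-- ===== PRECONDITION & SPEC =====
-- Pre_ excludes exactly the inputs where A raises IndexError: j ≥ 1 with row i missing,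
-- or j ≥ 1 exceeding the length of row i (A's first access grid[i][j-1] fails).
def Pre_can_see_occupied_west (grid : List (List String)) (i : Int) (j : Int) : Prop :=
  j ≤ 0 ∨ ∃ row, PySem.List.pyGet? grid i = some row ∧ j ≤ row.length
instance (grid : List (List String)) (i : Int) (j : Int) : Decidable (Pre_can_see_occupied_west grid i j) := by
  unfold Pre_can_see_occupied_west
  rcases h : PySem.List.pyGet? grid i with _ | row
  · exact decidable_of_iff (j ≤ 0) (by simp)
  · exact decidable_of_iff (j ≤ 0 ∨ j ≤ row.length) (by simp)

def pvWitness_can_see_occupied_west : List (List String) × Int × Int := ([["L", ".", "#", "."]], 0, 3)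

def Spec_can_see_occupied_west (grid : List (List String)) (i : Int) (j : Int) (out : Bool) : Prop := out = can_see_occupied_west_alt grid i j
instance (grid : List (List String)) (i : Int) (j : Int) (out : Bool) : Decidable (Spec_can_see_occupied_west grid i j out) := by unfold Spec_can_see_occupied_west; infer_instance

-- ===== CLAIM (what is proved, stated in full; the proofs are below) =====
def Claim_equal_can_see_occupied_west : Prop := ∀ (grid : List (List String)) (i : Int) (j : Int), Dom_can_see_occupied_west grid i j → Pre_can_see_occupied_west grid i j → Spec_can_see_occupied_west grid i j (can_see_occupied_west grid i j)

-- ===== LEMMAS AND PROOFS =====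

-- A's loop starting at index k-1, on a row with at least k cells, computes exactly
-- B's "last kept seat of the first k cells" value.
lemma canSeeWestLoop_eq (grid : List (List String)) (i : Int) (row : List String)
    (hrow : PySem.List.pyGet? grid i = some row) :
    ∀ (k : Nat), k ≤ row.length →
      canSeeWestLoop grid i ((k : Int) - 1) false =
        (match ((row.take k).filter (fun c => c = "#" ∨ c = "L")).getLast? with
          | none => false
          | some c => decide (c = "#")) := by
  intro k
  induction k with
  | zero => intro _; rw [canSeeWestLoop]; simp
  | succ k ih =>
    intro hk
    have hk' : k < row.length := by omega
    have hget : PySem.List.pyGet? row ((k : Int) + 1 - 1) = some row[k] := by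
      have : (k : Int) + 1 - 1 = (k : Int) := by ring
      rw [this, PySem.List.pyGet?_natCast, List.getElem?_eq_getElem hk']
    have htake : row.take (k + 1) = row.take k ++ [row[k]] := by
      rw [List.take_add_one, List.getElem?_eq_getElem hk']; rfl
    rw [canSeeWestLoop]
    have hpos : 0 ≤ (k : Int) + 1 - 1 := by omega
    rw [dif_pos (by push_cast; omega)]
    simp only [Nat.cast_add, Nat.cast_one] at *
    rw [hrow]
    simp only [Option.bind_some, hget]
    by_cases h1 : row[k] = "#"
    · simp [htake, h1, List.filter_append]
    · by_cases h2 : row[k] = "L"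
      · simp [htake, h2, List.filter_append]
      · have : (k : Int) + 1 - 1 - 1 = (k : Int) - 1 := by ring
        rw [if_neg h1, if_neg h2, this, ih (by omega)]
        have hf : (row.take (k+1)).filter (fun c => c = "#" ∨ c = "L")
            = (row.take k).filter (fun c => c = "#" ∨ c = "L") := by
          rw [htake, List.filter_append]
          simp only [List.filter_cons, List.filter_nil, decide_eq_true_eq]
          rw [if_neg (by simp [h1, h2]), List.append_nil]
        rw [hf]

-- ===== VERDICT (by name: the statement is the Claim_ definition above) =====
theorem can_see_occupied_west_spec : Claim_equal_can_see_occupied_west := by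
  intro grid i j _ hpre
  unfold Spec_can_see_occupied_west can_see_occupied_west can_see_occupied_west_alt
  rcases hpre with hj | ⟨row, hrow, hlen⟩
  · rw [if_pos hj, canSeeWestLoop]
    rw [dif_neg (by omega)]
  · by_cases hj : j ≤ 0
    · rw [if_pos hj, canSeeWestLoop, dif_neg (by omega)]
    · rw [if_neg hj]
      have hk : j = ((j.toNat : Nat) : Int) := by omega
      have hkl : j.toNat ≤ row.length := by omega
      rw [hrow]
      simp only [Option.getD_some]
      rw [hk, canSeeWestLoop_eq grid i row hrow j.toNat hkl,
        PySem.List.slice_to_natCast]
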